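-- pv_equiv track=rewrite | github.com/DoubleDi/python_projects | parent_child_tree/tree.py | collect_ancestors_with_levels
-- ===== SOURCE A (Python) =====
-- from typing import Dict, List, Set, Tuple
--
-- def collect_ancestors_with_levels(child_to_parents: Dict[int, List[int]], child: int) -> Set[Tuple[int, int]]:
--     ancestors = set()
--     queue = [(child, 0)]
--     while queue:
--         child, level = queue[0]
--         queue = queue[1:]
--         parents = child_to_parents.get(child, [])
--         for parent in parents:
--             ancestors.add((parent, level + 1))
--             queue.append((parent, level + 1))
--     return ancestors
-- ===== SOURCE B (Python) =====
-- def collect_ancestors_with_levels(child_to_parents, child):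
--     ancestors = set()
--     frontier = [child]
--     level = 0
--     while frontier:
--         level += 1
--         frontier = [p for node in frontier for p in child_to_parents.get(node, [])]
--         for p in frontier:
--             ancestors.add((p, level))
--     return ancestors
-- ===== Notes on version B (the rewrite author's own statement) =====
-- stated objective: alternative
-- what changed: Replaces the element-wise FIFO queue of (node, level) pairs (popped via queue = queue[1:]) by a level-synchronized frontier walk: each iteration expands the whole current generation at once with one comprehension and tags it with a single shared level counter.
import Mathlib
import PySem

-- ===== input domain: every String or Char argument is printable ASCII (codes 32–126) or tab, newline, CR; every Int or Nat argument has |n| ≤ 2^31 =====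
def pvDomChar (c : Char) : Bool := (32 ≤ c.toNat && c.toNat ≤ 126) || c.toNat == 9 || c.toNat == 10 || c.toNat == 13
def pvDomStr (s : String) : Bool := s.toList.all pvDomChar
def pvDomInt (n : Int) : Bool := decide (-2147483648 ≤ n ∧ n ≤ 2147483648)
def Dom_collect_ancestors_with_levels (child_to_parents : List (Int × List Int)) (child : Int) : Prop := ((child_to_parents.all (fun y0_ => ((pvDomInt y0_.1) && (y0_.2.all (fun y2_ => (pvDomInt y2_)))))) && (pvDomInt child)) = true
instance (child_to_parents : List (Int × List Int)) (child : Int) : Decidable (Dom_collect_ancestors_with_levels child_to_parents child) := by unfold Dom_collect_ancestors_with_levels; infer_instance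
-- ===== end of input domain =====

-- B replaces A's element-wise FIFO queue of (node, level) pairs (popped via queue = queue[1:])
-- by a level-synchronized frontier walk with one shared level counter.
-- On cyclic ancestry both Pythons loop forever; such inputs are outside Pre_ below.

-- one step of upward expansion: all parents of all nodes of a generation (used by both ports
-- and by Pre_; also used to compute port A's fuel guard)
def pvExpand (d : List (Int × List Int)) (xs : List Int) : List Int :=
  xs.flatMap (fun node => PySem.Dict.getD (PySem.Dict.mk d) node [])

-- ===== PORT A =====
-- fuel guard only: the exact number of queue pops A performs when it terminates
def pvFuelA (d : List (Int × List Int)) (child : Int) : Nat :=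
  ((List.range (d.length + 2)).map (fun i => ((pvExpand d)^[i] [child]).length)).sum + 1

def pvLoopA (d : List (Int × List Int)) :
    Nat → PySem.Set (Int × Int) → List (Int × Int) → List (Int × Int)
  | 0, ancestors, _ => ancestors
  | fuel + 1, ancestors, queue =>
    match queue with
    | [] => ancestors                      -- while queue: loop exits
    | (child, level) :: rest =>            -- child, level = queue[0]; queue = queue[1:]
      let parents := PySem.Dict.getD (PySem.Dict.mk d) child []
      let st := parents.foldl
        (fun (st : PySem.Set (Int × Int) × List (Int × Int)) parent =>
          (PySem.Set.add st.1 (parent, level + 1), st.2 ++ [(parent, level + 1)]))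
        (ancestors, rest)
      pvLoopA d fuel st.1 st.2

def collect_ancestors_with_levels (child_to_parents : List (Int × List Int)) (child : Int) :
    List (Int × Int) :=
  pvLoopA child_to_parents (pvFuelA child_to_parents child) PySem.Set.empty [(child, 0)]

-- ===== PORT B =====
def pvLoopB (d : List (Int × List Int)) :
    Nat → PySem.Set (Int × Int) → List Int → Int → List (Int × Int)
  | 0, ancestors, _, _ => ancestors
  | fuel + 1, ancestors, frontier, level =>
    if frontier = [] then ancestors        -- while frontier:
    else
      let level' := level + 1
      let frontier' := frontier.flatMap (fun node => PySem.Dict.getD (PySem.Dict.mk d) node [])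
      let ancestors' := frontier'.foldl (fun s p => PySem.Set.add s (p, level')) ancestors
      pvLoopB d fuel ancestors' frontier' level'

def collect_ancestors_with_levels_alt (child_to_parents : List (Int × List Int)) (child : Int) :
    List (Int × Int) :=
  pvLoopB child_to_parents (child_to_parents.length + 2) PySem.Set.empty [child] 0

-- ===== PRECONDITION & SPEC =====
-- Pre_ excludes exactly the inputs on which Python A never returns (a cyclic parent chain
-- reachable from child): in an acyclic parent graph every ancestor chain is simple, hence
-- shorter than the number of dict entries, so the (|d|+1)-st generation is empty.
def Pre_collect_ancestors_with_levels (child_to_parents : List (Int × List Int)) (child : Int) : Prop :=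
  (pvExpand child_to_parents)^[child_to_parents.length + 1] [child] = []
instance (child_to_parents : List (Int × List Int)) (child : Int) : Decidable (Pre_collect_ancestors_with_levels child_to_parents child) := by unfold Pre_collect_ancestors_with_levels; infer_instance

def pvWitness_collect_ancestors_with_levels : (List (Int × List Int)) × Int :=
  ([(1, [2, 3]), (2, [3, 4])], 1)

def Spec_collect_ancestors_with_levels (child_to_parents : List (Int × List Int)) (child : Int) (out : List (Int × Int)) : Prop := out = collect_ancestors_with_levels_alt child_to_parents child
instance (child_to_parents : List (Int × List Int)) (child : Int) (out : List (Int × Int)) : Decidable (Spec_collect_ancestors_with_levels child_to_parents child out) := by unfold Spec_collect_ancestors_with_levels; infer_instance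

-- ===== CLAIM (what is proved, stated in full; the proofs are below) =====
def Claim_equal_collect_ancestors_with_levels : Prop := ∀ (child_to_parents : List (Int × List Int)) (child : Int), Dom_collect_ancestors_with_levels child_to_parents child → Pre_collect_ancestors_with_levels child_to_parents child → Spec_collect_ancestors_with_levels child_to_parents child (collect_ancestors_with_levels child_to_parents child)

-- ===== LEMMAS AND PROOFS =====

-- the inner 'for parent in parents' loop of A, solved in closed form
theorem pvFoldA (l : Int) (ps : List Int)
    (anc : PySem.Set (Int × Int)) (q : List (Int × Int)) :
    ps.foldl
        (fun (st : PySem.Set (Int × Int) × List (Int × Int)) parent =>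
          (PySem.Set.add st.1 (parent, l + 1), st.2 ++ [(parent, l + 1)]))
        (anc, q)
      = (((ps.map (fun p => (p, l + 1))).foldl PySem.Set.add anc),
         q ++ ps.map (fun p => (p, l + 1))) := by
  induction ps generalizing anc q with
  | nil => simp
  | cons x xs ih => simp [ih]

-- processing one whole generation of A's queue consumes exactly its length of fuel
theorem pvLoopA_level (d : List (Int × List Int)) (l : Int) :
    ∀ (q1 q2 : List Int) (g : Nat) (anc : PySem.Set (Int × Int)),
    pvLoopA d (q1.length + g) anc
        (q1.map (fun c => (c, l)) ++ q2.map (fun c => (c, l + 1)))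
      = pvLoopA d g
        (((pvExpand d q1).map (fun p => (p, l + 1))).foldl PySem.Set.add anc)
        ((q2 ++ pvExpand d q1).map (fun c => (c, l + 1))) := by
  intro q1
  induction q1 with
  | nil => intro q2 g anc; simp [pvExpand]
  | cons x xs ih =>
    intro q2 g anc
    rw [show (x :: xs).length + g = (xs.length + g) + 1 by simp; omega]
    simp only [pvLoopA, List.map_cons, List.cons_append]
    rw [pvFoldA]
    dsimp only
    have hih := ih (q2 ++ PySem.Dict.getD (PySem.Dict.mk d) x []) g
      (List.foldl PySem.Set.add anc
        (List.map (fun p => (p, l + 1)) (PySem.Dict.getD (PySem.Dict.mk d) x [])))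
    simp only [List.map_append, List.append_assoc] at hih ⊢
    rw [hih]
    simp [pvExpand, List.foldl_append]

-- empty queue returns the accumulated set for any positive fuel
theorem pvLoopA_nil (d : List (Int × List Int)) (f : Nat) (anc : PySem.Set (Int × Int)) :
    pvLoopA d (f + 1) anc [] = anc := by
  simp [pvLoopA]

-- the bridge: if the k-th generation is empty, A's queue walk with its exact fuel
-- equals B's frontier walk with fuel k+1
theorem pvAB (d : List (Int × List Int)) :
    ∀ (k : Nat) (frontier : List Int) (l : Int) (anc : PySem.Set (Int × Int)),
    (pvExpand d)^[k] frontier = [] →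
    pvLoopA d (((List.range k).map (fun i => ((pvExpand d)^[i] frontier).length)).sum + 1)
        anc (frontier.map (fun c => (c, l)))
      = pvLoopB d (k + 1) anc frontier l := by
  intro k
  induction k with
  | zero =>
    intro frontier l anc h
    simp only [Function.iterate_zero, id] at h
    subst h
    simp [pvLoopA, pvLoopB]
  | succ k ih =>
    intro frontier l anc h
    by_cases hf : frontier = []
    · subst hf
      have : ∀ i, (pvExpand d)^[i] ([] : List Int) = [] := by
        intro i; induction i with
        | zero => rfl
        | succ i ihh => rw [Function.iterate_succ_apply, show pvExpand d [] = [] from rfl]; exact ihh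
      simp [pvLoopB, List.map_nil, pvLoopA_nil, this]
    · have hsum : ((List.range (k + 1)).map (fun i => ((pvExpand d)^[i] frontier).length)).sum
          = frontier.length +
            ((List.range k).map (fun i => ((pvExpand d)^[i] (pvExpand d frontier)).length)).sum := by
        rw [List.range_succ_eq_map]
        simp [Function.iterate_succ_apply, List.map_map, Function.comp_def]
      rw [hsum]
      have hA := pvLoopA_level d l frontier []
          (((List.range k).map (fun i => ((pvExpand d)^[i] (pvExpand d frontier)).length)).sum + 1) anc
      simp only [List.map_nil, List.append_nil, List.nil_append] at hA
      rw [Nat.add_assoc, hA]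
      rw [Function.iterate_succ_apply] at h
      rw [ih (pvExpand d frontier) (l + 1) _ h]
      simp only [pvLoopB, if_neg hf]
      simp [pvExpand, List.foldl_map]

-- ===== VERDICT (by name: the statement is the Claim_ definition above) =====
theorem collect_ancestors_with_levels_spec : Claim_equal_collect_ancestors_with_levels := by
  intro d child _ hpre
  unfold Pre_collect_ancestors_with_levels at hpre
  unfold Spec_collect_ancestors_with_levels
  unfold collect_ancestors_with_levels collect_ancestors_with_levels_alt pvFuelA
  have hsum : ((List.range (d.length + 2)).map (fun i => ((pvExpand d)^[i] [child]).length)).sum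
      = ((List.range (d.length + 1)).map (fun i => ((pvExpand d)^[i] [child]).length)).sum := by
    rw [show d.length + 2 = (d.length + 1) + 1 by omega, List.range_succ]
    simp [hpre]
  rw [hsum]
  have := pvAB d (d.length + 1) [child] 0 PySem.Set.empty hpre
  simpa using this
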